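-- pv_equiv track=rewrite | github.com/meurig/AoC2023 | day08/day08part1.py | traverse_map
-- ===== SOURCE A (Python) =====
-- from typing import List, Tuple, Dict
--
-- def traverse_map(directions: str, node_map: Dict[str, Tuple[str, str]]) -> int:
--     current_node = node_map['AAA']
--     total_steps = 0
--     while True:
--         for direction in directions:
--             total_steps += 1
--             if direction == 'L':
--                 new_node = current_node[0]
--             else:
--                 new_node = current_node[1]
--             if new_node == 'ZZZ':
--                 break
--             current_node = node_map[new_node]
--         else:
--             continue
--         break
--     return total_steps
-- ===== SOURCE B (Python) =====
-- def traverse_map(directions, node_map):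
--     # Pass-level jumping: memoize, per start node, the outcome of one full pass of
--     # `directions` (hit step within the pass, or the node where the pass ends),
--     # then walk pass-by-pass through that summary table.
--     n = len(directions)
--     pass_map = {}  # start name -> (hit step in pass or None, end name)
--
--     def one_pass(name):
--         cur = node_map[name]
--         nxt = name
--         for i, d in enumerate(directions, 1):
--             nxt = cur[0] if d == 'L' else cur[1]
--             if nxt == 'ZZZ':
--                 return i, nxt
--             if i < n:
--                 cur = node_map[nxt]
--         return None, nxt
--
--     name, passes = 'AAA', 0
--     while True:
--         if name not in pass_map:
--             pass_map[name] = one_pass(name)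
--         hit, end = pass_map[name]
--         if hit is not None:
--             return passes * n + hit
--         passes += 1
--         name = end
-- ===== Notes on version B (the rewrite author's own statement) =====
-- stated objective: alternative
-- what changed: B replaces A's step-by-step nested walk by a two-level algorithm: it memoizes, per start node, the summary of one whole pass of the directions (hit step or end node) in a dict, then jumps pass-by-pass through that table, so revisited pass-start nodes cost O(1) instead of re-walking the pass.
import Mathlib
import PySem

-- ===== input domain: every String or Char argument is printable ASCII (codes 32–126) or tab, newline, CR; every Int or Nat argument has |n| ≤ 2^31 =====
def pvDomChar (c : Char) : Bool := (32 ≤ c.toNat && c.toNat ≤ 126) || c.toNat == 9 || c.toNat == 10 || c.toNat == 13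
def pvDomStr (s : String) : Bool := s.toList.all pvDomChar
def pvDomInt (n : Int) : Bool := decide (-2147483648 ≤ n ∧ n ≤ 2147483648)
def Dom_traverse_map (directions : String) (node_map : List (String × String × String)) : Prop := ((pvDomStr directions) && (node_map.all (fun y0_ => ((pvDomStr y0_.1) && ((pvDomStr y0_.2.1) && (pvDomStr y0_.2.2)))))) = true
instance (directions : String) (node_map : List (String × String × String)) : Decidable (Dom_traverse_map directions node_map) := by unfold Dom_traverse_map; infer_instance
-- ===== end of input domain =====

-- ===== PORT A =====
-- B memoizes whole-pass summaries per start node and jumps pass-by-pass (objective: alternative).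
-- A diverges or raises KeyError outside Pre_; the equivalence is about the return value only.

-- inner 'for direction in directions' loop of A: none = KeyError,
-- Sum.inl t = break with total_steps t, Sum.inr (cur, s) = loop completed (the 'else: continue').
def pvInnerA (nm : List (String × String × String)) :
    List Char → String × String → Int → Option (Int ⊕ ((String × String) × Int))
  | [], cur, s => some (Sum.inr (cur, s))
  | d :: rest, cur, s =>
    let s' := s + 1
    let nn := if d = 'L' then cur.1 else cur.2
    if nn = "ZZZ" then some (Sum.inl s')
    else match List.lookup nn nm with
      | none => none
      | some c => pvInnerA nm rest c s'

-- outer 'while True' of A; fuel = node_map.length + 1 outer passes: by pigeonhole on the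
-- node held at the start of a pass, Python A terminates iff it breaks within that many passes.
def pvOuterA (ds : List Char) (nm : List (String × String × String)) :
    Nat → String × String → Int → Option Int
  | 0, _, _ => none
  | f + 1, cur, s =>
    match pvInnerA nm ds cur s with
    | none => none
    | some (Sum.inl t) => some t
    | some (Sum.inr (c, s')) => pvOuterA ds nm f c s'

def traverse_map (directions : String) (node_map : List (String × String × String)) : Int :=
  match List.lookup "AAA" node_map with
  | none => 0  -- KeyError in Python; outside Pre_
  | some cur => (pvOuterA directions.toList node_map (node_map.length + 1) cur 0).getD 0

-- ===== PORT B =====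
-- B's one_pass inner loop: 'for i, d in enumerate(directions, 1)'; none = KeyError mid-pass,
-- some (hit?, end) = (hit step within the pass or None, last child name).
def pvPassLoop (nm : List (String × String × String)) (n : Nat) :
    List Char → Nat → String × String → String → Option (Option Int × String)
  | [], _, _, nxt => some (none, nxt)
  | d :: rest, i, cur, _ =>
    let nxt := if d = 'L' then cur.1 else cur.2
    if nxt = "ZZZ" then some (some (i : Int), nxt)
    else if i < n then
      match List.lookup nxt nm with
      | none => none
      | some c => pvPassLoop nm n rest (i + 1) c nxt
    else pvPassLoop nm n rest (i + 1) cur nxt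

def pvOnePass (ds : List Char) (n : Nat) (nm : List (String × String × String))
    (name : String) : Option (Option Int × String) :=
  match List.lookup name nm with
  | none => none  -- KeyError on node_map[name]
  | some cur => pvPassLoop nm n ds 1 cur name

-- B's 'while True' loop over the memo table; fuel = node_map.length + 1 passes (same
-- pigeonhole bound as A's outer loop: under Pre_ the walk hits ZZZ within that many passes).
def pvJumpB (ds : List Char) (n : Nat) (nm : List (String × String × String)) :
    Nat → PySem.Dict String (Option Int × String) → String → Int → Option Int
  | 0, _, _, _ => none
  | f + 1, cache, name, passes =>
    match PySem.Dict.get? cache name with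
    | some (some h, _) => some (passes * (n : Int) + h)
    | some (none, end_) => pvJumpB ds n nm f cache end_ (passes + 1)
    | none =>
      match pvOnePass ds n nm name with
      | none => none
      | some v =>
        match v with
        | (some h, _) => some (passes * (n : Int) + h)
        | (none, end_) => pvJumpB ds n nm f (PySem.Dict.insert cache name v) end_ (passes + 1)

def traverse_map_alt (directions : String) (node_map : List (String × String × String)) : Int :=
  (pvJumpB directions.toList directions.toList.length node_map
     (node_map.length + 1) PySem.Dict.empty "AAA" 0).getD 0

-- ===== PRECONDITION & SPEC =====
-- Checker for Pre_: does the step-by-step walk from 'AAA' reach 'ZZZ' within f steps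
-- (all lookups defined)?
def pvReach (ds : List Char) (n : Int) (nm : List (String × String × String)) :
    Nat → Int → String × String → Bool
  | 0, _, _ => false
  | f + 1, steps, cur =>
    match PySem.List.pyGet? ds (PySem.Int.mod steps n) with
    | none => false
    | some d =>
      let nn := if d = 'L' then cur.1 else cur.2
      if nn = "ZZZ" then true
      else match List.lookup nn nm with
        | none => false
        | some c => pvReach ds n nm f (steps + 1) c

-- Termination of the walk has no closed form independent of the stepping map, so Pre_ states it
-- as bounded reachability: 'AAA' is a key and the walk reaches 'ZZZ' within
-- (|node_map|+1)*|directions| steps with every lookup defined. By pigeonhole on the node held at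
-- the start of each full pass this bound is exact: Python A returns normally iff Pre_ holds
-- (otherwise A raises KeyError or loops forever), so no input A returns on is excluded.
def Pre_traverse_map (directions : String) (node_map : List (String × String × String)) : Prop :=
  (match List.lookup "AAA" node_map with
   | none => false
   | some cur => pvReach directions.toList (PySem.Str.len directions) node_map
       ((node_map.length + 1) * directions.toList.length) 0 cur) = true

instance (directions : String) (node_map : List (String × String × String)) :
    Decidable (Pre_traverse_map directions node_map) := by
  unfold Pre_traverse_map; infer_instance

def pvWitness_traverse_map : String × (List (String × String × String)) :=
  ("L", [("AAA", ("ZZZ", "ZZZ"))])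

def Spec_traverse_map (directions : String) (node_map : List (String × String × String)) (out : Int) : Prop := out = traverse_map_alt directions node_map
instance (directions : String) (node_map : List (String × String × String)) (out : Int) : Decidable (Spec_traverse_map directions node_map out) := by unfold Spec_traverse_map; infer_instance

-- ===== CLAIM (what is proved, stated in full; the proofs are below) =====
def Claim_equal_traverse_map : Prop := ∀ (directions : String) (node_map : List (String × String × String)), Dom_traverse_map directions node_map → Pre_traverse_map directions node_map → Spec_traverse_map directions node_map (traverse_map directions node_map)

-- ===== LEMMAS AND PROOFS =====

-- Cacheless version of B's jump loop (proof helper): the memo table always stores exactly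
-- pvOnePass's value, so it can be eliminated.
def pvJumpNC (ds : List Char) (n : Nat) (nm : List (String × String × String)) :
    Nat → String → Int → Option Int
  | 0, _, _ => none
  | f + 1, name, passes =>
    match pvOnePass ds n nm name with
    | none => none
    | some (some h, _) => some (passes * (n : Int) + h)
    | some (none, end_) => pvJumpNC ds n nm f end_ (passes + 1)

theorem pvCacheElim (ds : List Char) (n : Nat) (nm : List (String × String × String)) :
    ∀ (F : Nat) (cache : PySem.Dict String (Option Int × String)) (name : String) (passes : Int),
    (∀ k v, PySem.Dict.get? cache k = some v → pvOnePass ds n nm k = some v) →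
    pvJumpB ds n nm F cache name passes = pvJumpNC ds n nm F name passes := by
  intro F
  induction F with
  | zero => intro cache name passes _; rfl
  | succ f ih =>
    intro cache name passes hinv
    simp only [pvJumpB, pvJumpNC]
    cases hc : PySem.Dict.get? cache name with
    | some v =>
      have hop := hinv name v hc
      rw [hop]
      obtain ⟨hit, end_⟩ := v
      cases hit with
      | some h => rfl
      | none => exact ih cache end_ (passes + 1) hinv
    | none =>
      cases hop : pvOnePass ds n nm name with
      | none => rfl
      | some v =>
        obtain ⟨hit, end_⟩ := v
        cases hit with
        | some h => rfl
        | none =>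
          refine ih _ end_ (passes + 1) ?_
          intro k w hk
          rw [PySem.Dict.get?_insert] at hk
          by_cases hkn : k = name
          · simp [hkn] at hk; rw [hkn, hop, ← hk]
          · simp [hkn] at hk; exact hinv k w hk

-- One pass of B's one_pass loop versus one pass of A's inner loop, for a suffix 'suf' of the
-- full direction list with current enumerate index i (so i + |suf| = n + 1, i ≥ 1).
theorem pvPassInner (nm : List (String × String × String)) (n : Nat) :
    ∀ (suf : List Char) (i : Nat) (cur : String × String) (s : Int) (name : String),
    i + suf.length = n + 1 →
    (suf = [] → List.lookup name nm = some cur) →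
    (match pvPassLoop nm n suf i cur name with
     | none => pvInnerA nm suf cur s = none
     | some (some h, _) => pvInnerA nm suf cur s = some (Sum.inl (s + 1 + h - (i : Int)))
     | some (none, end_) =>
         match List.lookup end_ nm with
         | none => pvInnerA nm suf cur s = none
         | some c => pvInnerA nm suf cur s = some (Sum.inr (c, s + suf.length))) := by
  intro suf
  induction suf with
  | nil =>
    intro i cur s name _ hname
    simp only [pvPassLoop, pvInnerA, hname rfl, List.length_nil]
    norm_num
  | cons d rest ih =>
    intro i cur s name hlen _
    simp only [pvPassLoop, pvInnerA]
    by_cases hz : (if d = 'L' then cur.1 else cur.2) = "ZZZ"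
    · simp only [hz]
      push_cast; ring_nf
    · simp only [hz, ite_false]
      by_cases hi : i < n
      · simp only [if_pos hi]
        cases hlk : List.lookup (if d = 'L' then cur.1 else cur.2) nm with
        | none => simp
        | some c =>
          simp only
          have hlen' : (i + 1) + rest.length = n + 1 := by
            simp at hlen; omega
          have hrest : rest = [] → List.lookup (if d = 'L' then cur.1 else cur.2) nm = some c := fun _ => hlk
          have := ih (i + 1) c (s + 1) (if d = 'L' then cur.1 else cur.2) hlen' hrest
          cases hp : pvPassLoop nm n rest (i + 1) c (if d = 'L' then cur.1 else cur.2) with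
          | none => rw [hp] at this; exact this
          | some v =>
            rw [hp] at this
            obtain ⟨hit, end_⟩ := v
            cases hit with
            | some h =>
              dsimp only at this ⊢
              rw [this]; congr 1; congr 1; push_cast; ring_nf
            | none =>
              dsimp only at this ⊢
              cases hlk2 : List.lookup end_ nm with
              | none => rw [hlk2] at this; exact this
              | some c2 =>
                rw [hlk2] at this; rw [this]
                congr 2; push_cast [List.length_cons]; ring_nf
      · -- i = n, hence rest = []
        have hr : rest = [] := by
          simp only [List.length_cons] at hlen ⊢
          have : rest.length = 0 := by omega
          exact List.length_eq_zero_iff.mp this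
        subst hr
        simp only [if_neg hi, pvPassLoop]
        cases hlk : List.lookup (if d = 'L' then cur.1 else cur.2) nm with
        | none => simp
        | some c => simp [pvInnerA]
    
-- B's cacheless pass-jump loop equals A's outer loop, fuel for fuel.
theorem pvJumpOuter (nm : List (String × String × String)) (ds : List Char) (hds : ds ≠ []) :
    ∀ (F : Nat) (name : String) (cur : String × String) (q : Nat),
    List.lookup name nm = some cur →
    pvJumpNC ds ds.length nm F name ((q : Nat) : Int)
      = pvOuterA ds nm F cur ((q * ds.length : Nat) : Int) := by
  intro F
  induction F with
  | zero => intro name cur q _; rfl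
  | succ f ih =>
    intro name cur q hlk
    simp only [pvJumpNC, pvOuterA, pvOnePass, hlk]
    have hlen : 1 + ds.length = ds.length + 1 := by omega
    have := pvPassInner nm ds.length ds 1 cur ((q * ds.length : Nat) : Int) name hlen
      (fun h => absurd h hds)
    cases hp : pvPassLoop nm ds.length ds 1 cur name with
    | none => rw [hp] at this; rw [this]
    | some v =>
      rw [hp] at this
      obtain ⟨hit, end_⟩ := v
      cases hit with
      | some h =>
        dsimp only at this ⊢
        rw [this]
        congr 1
        push_cast; ring_nf
      | none =>
        dsimp only at this ⊢
        cases hlk2 : List.lookup end_ nm with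
        | none =>
          rw [hlk2] at this; rw [this]
          -- B recurses once more, then pvOnePass end_ fails
          cases f with
          | zero => rfl
          | succ f' => simp [pvJumpNC, pvOnePass, hlk2]
        | some c =>
          rw [hlk2] at this; rw [this]
          have hq1 : ((q : Nat) : Int) + 1 = (((q + 1 : Nat)) : Int) := by push_cast; ring_nf
          have hs : ((q * ds.length : Nat) : Int) + (ds.length : Int)
              = (((q + 1) * ds.length : Nat) : Int) := by push_cast; ring_nf
          rw [hq1, hs]
          exact ih end_ c (q + 1) hlk2

-- ===== VERDICT (by name: the statement is the Claim_ definition above) =====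
theorem traverse_map_spec : Claim_equal_traverse_map := by
  intro directions node_map _ hpre
  unfold Pre_traverse_map at hpre
  unfold Spec_traverse_map traverse_map traverse_map_alt
  cases hlk : List.lookup "AAA" node_map with
  | none => rw [hlk] at hpre; simp at hpre
  | some cur =>
    rw [hlk] at hpre
    have hds : directions.toList ≠ [] := by
      intro h
      rw [h] at hpre
      simp [pvReach] at hpre
    rw [pvCacheElim _ _ _ _ _ _ _ (by intro k v h; simp [PySem.Dict.get?_empty] at h)]
    have h0 : (0 : Int) = ((0 : Nat) : Int) := rfl
    rw [h0, pvJumpOuter node_map directions.toList hds (node_map.length + 1) "AAA" cur 0 hlk]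
    norm_num
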